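-- pv_equiv track=rewrite | github.com/harjassand/AGI-Stack-Unchained | scripts/run_long_disciplined_loop_v1.py | _canonical_axis_gate_relpath
-- ===== SOURCE A (Python) =====
-- from typing import Any
--
-- def _canonical_axis_gate_relpath(path_value: Any) -> str:
--     raw = str(path_value).strip().replace("\\", "/")
--     parts: list[str] = []
--     for token in raw.split("/"):
--         part = str(token).strip()
--         if not part or part == ".":
--             continue
--         if part == "..":
--             return ""
--         parts.append(part)
--     if not parts:
--         return ""
--     return "/".join(parts)
-- ===== SOURCE B (Python) =====
-- def _canonical_axis_gate_relpath(path_value) -> str: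
--     s = str(path_value).strip()
--     segs = []
--     buf = []
--     bad = False
--     for ch in s + "/":
--         if ch == "/" or ch == "\\":
--             seg = "".join(buf).strip()
--             buf = []
--             if seg == "..":
--                 bad = True
--             elif seg and seg != ".":
--                 segs.append(seg)
--         else:
--             buf.append(ch)
--     return "" if bad else "/".join(segs)
-- ===== Notes on version B (the rewrite author's own statement) =====
-- stated objective: alternative
-- what changed: Replaces A's strip/replace/split/per-token-strip/join string pipeline by a single character-level streaming scan that accumulates a segment buffer, closes it at either kind of slash, flags a parent-directory segment, and never materializes the token list.
import Mathlib
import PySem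

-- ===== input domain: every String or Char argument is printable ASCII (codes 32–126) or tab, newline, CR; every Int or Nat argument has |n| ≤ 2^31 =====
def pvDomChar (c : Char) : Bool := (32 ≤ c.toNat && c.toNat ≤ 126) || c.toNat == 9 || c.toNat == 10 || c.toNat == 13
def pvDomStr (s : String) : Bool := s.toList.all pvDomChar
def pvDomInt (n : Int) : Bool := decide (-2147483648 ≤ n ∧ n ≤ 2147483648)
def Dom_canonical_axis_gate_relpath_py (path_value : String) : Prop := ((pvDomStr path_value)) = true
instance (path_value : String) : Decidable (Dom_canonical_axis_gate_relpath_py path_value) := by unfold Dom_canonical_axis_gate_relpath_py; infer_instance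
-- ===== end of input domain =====

-- B replaces A's strip/replace/split/strip/join pipeline by a single character-level
-- streaming scan (a segment buffer closed at either kind of slash); objective: alternative.


-- ===== PORT A =====
-- A's for-loop with early return, as structural recursion carrying the parts accumulator
def canonAxisLoopA : List String → List String → String
  | [], parts => if parts = [] then "" else PySem.Str.join "/" parts
  | token :: rest, parts =>
    let part := PySem.Str.strip token
    if part = "" ∨ part = "." then canonAxisLoopA rest parts
    else if part = ".." then ""
    else canonAxisLoopA rest (parts ++ [part])

def canonical_axis_gate_relpath_py (path_value : String) : String :=
  let raw := PySem.Str.replace (PySem.Str.strip path_value) "\\" "/"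
  canonAxisLoopA (((PySem.Str.split? raw "/").getD [])) []

-- ===== PORT B =====
-- B's loop body: state (segs, buf, bad); buf holds the pending segment's characters
-- ("".join(buf).strip() is ported as PySem.Chars.strip buf, exact on the char list,
--  and segment/".."/"."/"" comparisons are the corresponding char-list comparisons)
def pvStepB : List String × List Char × Bool → Char → List String × List Char × Bool
  | (segs, buf, bad), c =>
    if c = '/' ∨ c = '\\' then
      let seg := PySem.Chars.strip buf
      if seg = ['.', '.'] then (segs, [], true)
      else if seg ≠ [] ∧ seg ≠ ['.'] then (segs ++ [String.ofList seg], [], bad)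
      else (segs, [], bad)
    else (segs, buf ++ [c], bad)

def canonical_axis_gate_relpath_py_alt (path_value : String) : String :=
  let s := PySem.Str.strip path_value
  let r := (s.toList ++ ['/']).foldl pvStepB ([], [], false)
  if r.2.2 then "" else PySem.Str.join "/" r.1

-- ===== PRECONDITION & SPEC =====
def Spec_canonical_axis_gate_relpath_py (path_value : String) (out : String) : Prop := out = canonical_axis_gate_relpath_py_alt path_value
instance (path_value : String) (out : String) : Decidable (Spec_canonical_axis_gate_relpath_py path_value out) := by unfold Spec_canonical_axis_gate_relpath_py; infer_instance

-- ===== CLAIM (what is proved, stated in full; the proofs are below) =====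
def Claim_equal_canonical_axis_gate_relpath_py : Prop := ∀ (path_value : String), Dom_canonical_axis_gate_relpath_py path_value → Spec_canonical_axis_gate_relpath_py path_value (canonical_axis_gate_relpath_py path_value)

-- ===== LEMMAS AND PROOFS =====
def pvRepl (c : Char) : Char := if c = '\\' then '/' else c

theorem pv_prefix_slash (c : Char) (t : List Char) :
    (['\\'] : List Char).isPrefixOf (c :: t) = (c == '\\') := by
  show (('\\' == c) && List.isPrefixOf [] t) = (c == '\\')
  cases h : c == '\\'
  · simp_all [BEq.comm]
  · simp [beq_iff_eq] at h
    simp [h, List.isPrefixOf]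

theorem pv_replace_go (l : List Char) : ∀ (fuel : Nat) (acc : List Char), l.length ≤ fuel →
    PySem.Chars.replace.go ['\\'] ['/'] fuel l acc = acc.reverse ++ l.map pvRepl := by
  induction l with
  | nil => intro fuel acc _; cases fuel <;> rw [PySem.Chars.replace.go.eq_def] <;> simp
  | cons c t ih =>
    intro fuel acc h
    cases fuel with
    | zero => simp at h
    | succ f =>
      rw [PySem.Chars.replace.go.eq_def]
      simp only [pv_prefix_slash]
      by_cases hc : c = '\\'
      · simp only [hc, beq_self_eq_true, if_true, List.drop_succ_cons, List.length_cons,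
          List.length_nil, List.drop_zero]
        rw [ih f _ (by simpa using h)]
        simp [pvRepl]
      · simp only [beq_eq_false_iff_ne.mpr hc, Bool.false_eq_true, if_false]
        rw [ih f _ (by simpa using h)]
        simp [pvRepl, hc]

theorem pv_replace_eq (l : List Char) :
    PySem.Chars.replace l ['\\'] ['/'] = l.map pvRepl := by
  rw [PySem.Chars.replace]
  simp only [List.isEmpty_cons, Bool.false_eq_true, if_false]
  exact pv_replace_go l l.length [] le_rfl

def pvSplitC : List Char → List (List Char)
  | [] => [[]]
  | c :: t => if c = '/' then [] :: pvSplitC t else (pvSplitC t).modifyHead (c :: ·)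

def pvSplitB : List Char → List (List Char)
  | [] => [[]]
  | c :: t => if c = '/' ∨ c = '\\' then [] :: pvSplitB t else (pvSplitB t).modifyHead (c :: ·)

theorem pv_prefix_fslash (c : Char) (t : List Char) :
    (['/'] : List Char).isPrefixOf (c :: t) = (c == '/') := by
  show (('/' == c) && List.isPrefixOf [] t) = (c == '/')
  cases h : c == '/'
  · simp_all [BEq.comm]
  · simp [beq_iff_eq] at h
    simp [h, List.isPrefixOf]

theorem pv_splitOn_go (l : List Char) : ∀ (fuel : Nat) (cur : List Char) (acc : List (List Char)),
    l.length ≤ fuel →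
    PySem.Chars.splitOn.go ['/'] fuel l cur acc
      = acc.reverse ++ (pvSplitC l).modifyHead (cur.reverse ++ ·) := by
  induction l with
  | nil => intro fuel cur acc _; cases fuel <;> rw [PySem.Chars.splitOn.go.eq_def] <;> simp [pvSplitC]
  | cons c t ih =>
    intro fuel cur acc h
    cases fuel with
    | zero => simp at h
    | succ f =>
      rw [PySem.Chars.splitOn.go.eq_def]
      simp only [pv_prefix_fslash]
      by_cases hc : c = '/'
      · simp only [hc, beq_self_eq_true, if_true, List.length_cons, List.drop_succ_cons,
          List.length_nil, List.drop_zero]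
        rw [ih f _ _ (by simpa using h)]
        simp only [pvSplitC, hc, if_true, List.modifyHead_cons, List.reverse_cons,
          List.reverse_nil, List.nil_append, List.append_assoc, List.cons_append]
        cases pvSplitC t <;> simp
      · simp only [beq_eq_false_iff_ne.mpr hc, Bool.false_eq_true, if_false]
        rw [ih f _ _ (by simpa using h)]
        simp only [pvSplitC, hc, if_false, List.reverse_cons, List.modifyHead_modifyHead]
        have : (fun x => cur.reverse ++ [c] ++ x) = ((fun x => cur.reverse ++ x) ∘ fun x => c :: x) := by
          funext x; simp
        rw [this]

theorem pv_splitOn_eq (l : List Char) :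
    PySem.Chars.splitOn l ['/'] = pvSplitC l := by
  rw [PySem.Chars.splitOn]
  rw [pv_splitOn_go l (l.length + 1) [] [] (by omega)]
  cases h : pvSplitC l <;> simp

theorem pv_splitB_eq (l : List Char) : pvSplitC (l.map pvRepl) = pvSplitB l := by
  induction l with
  | nil => rfl
  | cons c t ih =>
    by_cases hc : c = '/' ∨ c = '\\'
    · have hr : pvRepl c = '/' := by
        rcases hc with h | h <;> simp [pvRepl, h]
      simp [pvSplitC, pvSplitB, hr, hc, ih]
    · have hr : pvRepl c = c := by
        simp [pvRepl]; intro h; exact absurd (Or.inr h) hc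
      have hne : ¬ c = '/' := fun h => hc (Or.inl h)
      have hne2 : ¬ c = '\\' := fun h => hc (Or.inr h)
      simp [pvSplitC, pvSplitB, hr, hne, hne2, ih]

theorem pv_tokensA (r : String) :
    (PySem.Str.split? r "/").getD [] = (pvSplitC r.toList).map String.ofList := by
  have hs : ("/" : String).toList = ['/'] := by decide
  rw [PySem.Str.split?, PySem.Chars.split?, hs]
  simp [pv_splitOn_eq]

theorem pv_beq_ofList (t u : List Char) :
    (String.ofList t == String.ofList u) = (t == u) := by
  by_cases h : t = u
  · simp [h]
  · simp [beq_eq_false_iff_ne, h, String.ofList_inj]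

theorem pv_strip_ofList (t : List Char) :
    PySem.Str.strip (String.ofList t) = String.ofList (PySem.Chars.strip t) := by
  have h1 : (PySem.Str.strip (String.ofList t)).toList = PySem.Chars.strip t := by
    rw [PySem.Str.toList_strip]; simp
  have h2 := congrArg String.ofList h1
  rwa [String.ofList_toList] at h2

def pvKeepC (t : List Char) : Bool := !(t == []) && !(t == ['.']) && !(t == ['.', '.'])
def pvKeepS (s : String) : Bool := !(s == "") && !(s == ".") && !(s == "..")

theorem pv_lit_nil : ("" : String) = String.ofList [] := by decide
theorem pv_lit_dot : ("." : String) = String.ofList ['.'] := by decide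
theorem pv_lit_dd : (".." : String) = String.ofList ['.', '.'] := by decide

theorem pv_keep_bridge (t : List Char) : pvKeepS (String.ofList t) = pvKeepC t := by
  rw [pvKeepS, pvKeepC, pv_lit_nil, pv_lit_dot, pv_lit_dd, pv_beq_ofList, pv_beq_ofList, pv_beq_ofList]

theorem pv_contains_bridge (ts : List (List Char)) :
    (ts.map String.ofList).contains ".." = ts.contains ['.', '.'] := by
  induction ts with
  | nil => rfl
  | cons a l ih => simp only [List.map_cons, List.contains_cons, ih, pv_lit_dd, pv_beq_ofList]

def pvEmit (toks : List (List Char)) : List String :=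
  ((toks.map PySem.Chars.strip).filter pvKeepC).map String.ofList
def pvHasDD (toks : List (List Char)) : Bool :=
  (toks.map PySem.Chars.strip).contains ['.', '.']

theorem pv_foldB (l : List Char) : ∀ (segs : List String) (buf : List Char) (bad : Bool),
    (l ++ ['/']).foldl pvStepB (segs, buf, bad)
      = (segs ++ pvEmit ((pvSplitB l).modifyHead (buf ++ ·)), [],
         bad || pvHasDD ((pvSplitB l).modifyHead (buf ++ ·))) := by
  induction l with
  | nil =>
    intro segs buf bad
    have hT : List.modifyHead (fun x => buf ++ x) (pvSplitB []) = [buf] := by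
      simp [pvSplitB]
    simp only [List.nil_append, List.foldl_cons, List.foldl_nil, hT]
    show pvStepB (segs, buf, bad) '/' = _
    rw [pvStepB]
    rw [if_pos (Or.inl rfl)]
    by_cases h1 : PySem.Chars.strip buf = ['.', '.']
    · rw [if_pos h1]
      simp [pvEmit, pvHasDD, pvKeepC, h1]
    · have h1' : ¬ ['.', '.'] = PySem.Chars.strip buf := fun h => h1 h.symm
      rw [if_neg h1]
      by_cases h2 : PySem.Chars.strip buf ≠ [] ∧ PySem.Chars.strip buf ≠ ['.']
      · rw [if_pos h2]
        simp [pvEmit, pvHasDD, pvKeepC, h2.1, h2.2, h1, h1']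
      · rw [if_neg h2]
        simp only [ne_eq, not_and, not_not] at h2
        by_cases h3 : PySem.Chars.strip buf = []
        · simp [pvEmit, pvHasDD, pvKeepC, h3]
        · have h4 := h2 h3
          simp [pvEmit, pvHasDD, pvKeepC, h3, h4, h1']
  | cons c t ih =>
    intro segs buf bad
    rw [List.cons_append, List.foldl_cons]
    by_cases hc : c = '/' ∨ c = '\\'
    · have hT : List.modifyHead (fun x => buf ++ x) (pvSplitB (c :: t)) = buf :: pvSplitB t := by
        simp [pvSplitB, hc]
      rw [hT]
      show (t ++ ['/']).foldl pvStepB (pvStepB (segs, buf, bad) c) = _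
      rw [pvStepB]
      rw [if_pos hc]
      have hmh : ∀ z : List (List Char), List.modifyHead (fun x => ([] : List Char) ++ x) z = z := by
        intro z; cases z <;> simp
      by_cases h1 : PySem.Chars.strip buf = ['.', '.']
      · rw [if_pos h1, ih segs [] true, hmh]
        simp [pvEmit, pvHasDD, pvKeepC, h1]
      · have h1' : ¬ ['.', '.'] = PySem.Chars.strip buf := fun h => h1 h.symm
        rw [if_neg h1]
        by_cases h2 : PySem.Chars.strip buf ≠ [] ∧ PySem.Chars.strip buf ≠ ['.']
        · rw [if_pos h2, ih (segs ++ [String.ofList (PySem.Chars.strip buf)]) [] bad, hmh]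
          simp [pvEmit, pvHasDD, pvKeepC, h2.1, h2.2, h1, h1']
        · rw [if_neg h2, ih segs [] bad, hmh]
          simp only [ne_eq, not_and, not_not] at h2
          by_cases h3 : PySem.Chars.strip buf = []
          · simp [pvEmit, pvHasDD, pvKeepC, h3]
          · have h4 := h2 h3
            simp [pvEmit, pvHasDD, pvKeepC, h3, h4, h1']
    · have hT : List.modifyHead (fun x => buf ++ x) (pvSplitB (c :: t))
          = (pvSplitB t).modifyHead (fun x => (buf ++ [c]) ++ x) := by
        rw [pvSplitB]
        rw [if_neg hc]
        rw [List.modifyHead_modifyHead]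
        congr 1
        funext x
        simp
      rw [hT]
      show (t ++ ['/']).foldl pvStepB (pvStepB (segs, buf, bad) c) = _
      rw [pvStepB]
      rw [if_neg hc]
      exact ih segs (buf ++ [c]) bad

theorem pv_loopA (ts : List String) : ∀ parts : List String,
    canonAxisLoopA ts parts =
      if (ts.map PySem.Str.strip).contains ".." then ""
      else PySem.Str.join "/" (parts ++ (ts.map PySem.Str.strip).filter pvKeepS) := by
  induction ts with
  | nil =>
    intro parts
    simp only [List.map_nil, List.contains_eq_mem, List.filter_nil, List.append_nil,
      List.not_mem_nil, decide_false]
    cases parts with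
    | nil => simp [canonAxisLoopA]; decide
    | cons a l => simp [canonAxisLoopA]
  | cons t rest ih =>
    intro parts
    show (let part := PySem.Str.strip t;
      if part = "" ∨ part = "." then canonAxisLoopA rest parts
      else if part = ".." then ""
      else canonAxisLoopA rest (parts ++ [part])) = _
    by_cases h1 : PySem.Str.strip t = "" ∨ PySem.Str.strip t = "."
    · have hk : pvKeepS (PySem.Str.strip t) = false := by
        rcases h1 with h | h <;> simp [pvKeepS, h]
      have hne : PySem.Str.strip t ≠ ".." := by
        rcases h1 with h | h <;> simp [h]
      simp [h1, ih, List.contains_eq_mem, Ne.symm hne, hk]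
    · by_cases h2 : PySem.Str.strip t = ".."
      · simp [h2, List.contains_eq_mem]
      · push_neg at h1
        have hk : pvKeepS (PySem.Str.strip t) = true := by
          simp [pvKeepS, h1.1, h1.2, h2]
        simp [h1, ih, List.contains_eq_mem, Ne.symm h2, hk]
        exact fun h _ => absurd h h2

theorem pv_final (p : String) : canonical_axis_gate_relpath_py p = canonical_axis_gate_relpath_py_alt p := by
  show canonAxisLoopA ((PySem.Str.split? (PySem.Str.replace (PySem.Str.strip p) "\\" "/") "/").getD []) []
      = (if (((PySem.Str.strip p).toList ++ ['/']).foldl pvStepB ([], [], false)).2.2 = true then ""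
         else PySem.Str.join "/" (((PySem.Str.strip p).toList ++ ['/']).foldl pvStepB ([], [], false)).1)
  rw [pv_tokensA, pv_loopA, pv_foldB]
  have hraw : (PySem.Str.replace (PySem.Str.strip p) "\\" "/").toList
      = (PySem.Str.strip p).toList.map pvRepl := by
    rw [PySem.Str.toList_replace]
    exact pv_replace_eq _
  rw [hraw, pv_splitB_eq]
  have hmh : List.modifyHead (fun x => ([] : List Char) ++ x) (pvSplitB (PySem.Str.strip p).toList)
      = pvSplitB (PySem.Str.strip p).toList := by
    cases h : pvSplitB (PySem.Str.strip p).toList <;> simp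
  rw [hmh]
  set ts := pvSplitB (PySem.Str.strip p).toList with hts
  have hmap : (ts.map String.ofList).map PySem.Str.strip
      = (ts.map PySem.Chars.strip).map String.ofList := by
    rw [List.map_map, List.map_map]
    apply List.map_congr_left
    intro a _
    exact pv_strip_ofList a
  have hcond : ((ts.map String.ofList).map PySem.Str.strip).contains ".."
      = pvHasDD ts := by
    rw [hmap, pv_contains_bridge]
    rfl
  have hfilt : ((ts.map String.ofList).map PySem.Str.strip).filter pvKeepS
      = pvEmit ts := by
    rw [hmap, List.filter_map]
    have hfun : (pvKeepS ∘ String.ofList) = pvKeepC := funext pv_keep_bridge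
    rw [hfun]
    rfl
  rw [hcond, hfilt]
  rw [Bool.false_or, List.nil_append]

-- ===== VERDICT (by name: the statement is the Claim_ definition above) =====
theorem canonical_axis_gate_relpath_py_spec : Claim_equal_canonical_axis_gate_relpath_py := by
  intro path_value _
  exact pv_final path_value
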